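-- pv_equiv track=rewrite | github.com/shreyasnbhat/FOL-Solver | og.py | convert_implication_to_cnf
-- ===== SOURCE A (Python) =====
-- def convert_implication_to_cnf(tokens):
--     # p => q becomes ~p or q
--     cnfRule = []
--     implicationReached = False
--     for i in tokens:
--         if not implicationReached and (i != "=>" and i != "&"):
--             cnfRule.append("~" + i)
--         elif i == "=>":
--             cnfRule.append("|")
--             implicationReached = True
--         elif i == "&":
--             cnfRule.append("|")
--         else:
--             cnfRule.append(i)
--
--     return " ".join(cnfRule)
-- ===== SOURCE B (Python) =====
-- def convert_implication_to_cnf(tokens):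
--     idx = tokens.index("=>") if "=>" in tokens else len(tokens)
--     ante = ["|" if t == "&" else "~" + t for t in tokens[:idx]]
--     cons = ["|" if t in ("=>", "&") else t for t in tokens[idx:]]
--     return " ".join(ante + cons)
-- ===== Notes on version B (the rewrite author's own statement) =====
-- stated objective: simpler
-- what changed: Replaced A's single stateful loop with an implicationReached flag by locating the first '=>' with index() and mapping the antecedent and consequent slices independently, then joining.
import Mathlib
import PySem

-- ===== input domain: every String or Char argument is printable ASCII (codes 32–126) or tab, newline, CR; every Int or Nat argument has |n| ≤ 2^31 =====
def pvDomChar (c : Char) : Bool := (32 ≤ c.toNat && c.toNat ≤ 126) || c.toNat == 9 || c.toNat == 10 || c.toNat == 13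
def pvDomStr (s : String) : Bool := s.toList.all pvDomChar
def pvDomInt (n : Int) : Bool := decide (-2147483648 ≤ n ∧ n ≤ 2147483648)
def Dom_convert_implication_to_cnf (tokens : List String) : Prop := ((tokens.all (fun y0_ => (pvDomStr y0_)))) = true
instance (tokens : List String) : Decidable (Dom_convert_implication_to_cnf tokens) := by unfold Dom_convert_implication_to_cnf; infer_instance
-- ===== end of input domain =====

-- B replaces A's stateful one-pass flag loop by locating the first "=>" and mapping the two halves independently (objective: simpler decomposition, same cost).

-- ===== PORT A =====
-- literal port of A: one fold carrying (cnfRule, implicationReached)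
def convert_implication_to_cnf (tokens : List String) : String :=
  let res := tokens.foldl (fun (st : List String × Bool) i =>
    if st.2 = false ∧ (i ≠ "=>" ∧ i ≠ "&") then (st.1 ++ ["~" ++ i], st.2)
    else if i = "=>" then (st.1 ++ ["|"], true)
    else if i = "&" then (st.1 ++ ["|"], st.2)
    else (st.1 ++ [i], st.2)) ([], false)
  PySem.Str.join " " res.1

-- ===== PORT B =====
-- literal port of Source B: idx = tokens.index("=>") if present else len(tokens); map the two slices
def convert_implication_to_cnf_alt (tokens : List String) : String :=
  let idx : Int := match PySem.List.index? tokens "=>" with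
    | some i => (i : Int)
    | none => (tokens.length : Int)
  let ante := (PySem.List.slice tokens none (some idx)).map
    (fun t => if t = "&" then "|" else "~" ++ t)
  let cons := (PySem.List.slice tokens (some idx) none).map
    (fun t => if t = "=>" ∨ t = "&" then "|" else t)
  PySem.Str.join " " (ante ++ cons)

-- ===== PRECONDITION & SPEC =====
def Spec_convert_implication_to_cnf (tokens : List String) (out : String) : Prop := out = convert_implication_to_cnf_alt tokens
instance (tokens : List String) (out : String) : Decidable (Spec_convert_implication_to_cnf tokens out) := by unfold Spec_convert_implication_to_cnf; infer_instance

-- ===== CLAIM (what is proved, stated in full; the proofs are below) =====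
def Claim_equal_convert_implication_to_cnf : Prop := ∀ (tokens : List String), Dom_convert_implication_to_cnf tokens → Spec_convert_implication_to_cnf tokens (convert_implication_to_cnf tokens)

-- ===== LEMMAS AND PROOFS =====

-- the token list both programs produce, as one recursion
def pvAnte (t : String) : String := if t = "&" then "|" else "~" ++ t
def pvCons (t : String) : String := if t = "=>" ∨ t = "&" then "|" else t

def pvG : List String → List String
  | [] => []
  | t :: ts => if t = "=>" then "|" :: ts.map pvCons else pvAnte t :: pvG ts

-- A's loop once the flag is set appends the consequent mapping of the rest
lemma loopA_true (ts : List String) (acc : List String) :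
    ts.foldl (fun (st : List String × Bool) i =>
      if st.2 = false ∧ (i ≠ "=>" ∧ i ≠ "&") then (st.1 ++ ["~" ++ i], st.2)
      else if i = "=>" then (st.1 ++ ["|"], true)
      else if i = "&" then (st.1 ++ ["|"], st.2)
      else (st.1 ++ [i], st.2)) (acc, true)
    = (acc ++ ts.map pvCons, true) := by
  induction ts generalizing acc with
  | nil => simp
  | cons t ts ih =>
    by_cases h1 : t = "=>" <;> by_cases h2 : t = "&" <;>
      simp [h1, h2, ih, pvCons, List.foldl_cons]

-- A's loop with the flag unset computes pvG
lemma loopA_false (ts : List String) (acc : List String) :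
    (ts.foldl (fun (st : List String × Bool) i =>
      if st.2 = false ∧ (i ≠ "=>" ∧ i ≠ "&") then (st.1 ++ ["~" ++ i], st.2)
      else if i = "=>" then (st.1 ++ ["|"], true)
      else if i = "&" then (st.1 ++ ["|"], st.2)
      else (st.1 ++ [i], st.2)) (acc, false)).1
    = acc ++ pvG ts := by
  induction ts generalizing acc with
  | nil => simp [pvG]
  | cons t ts ih =>
    by_cases h1 : t = "=>"
    · simp [h1, pvG, loopA_true]
    · by_cases h2 : t = "&" <;> simp [h1, h2, pvG, pvAnte, ih, List.foldl_cons]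

-- pvG on a list without "=>" is the antecedent mapping
lemma pvG_no_imp (ts : List String) (h : "=>" ∉ ts) : pvG ts = ts.map pvAnte := by
  induction ts with
  | nil => simp [pvG]
  | cons t ts ih =>
    simp only [List.mem_cons, not_or] at h
    simp [pvG, Ne.symm h.1, ih h.2]

-- pvG across the first "=>"
lemma pvG_split (pre suf : List String) (h : "=>" ∉ pre) :
    pvG (pre ++ "=>" :: suf) = pre.map pvAnte ++ "|" :: suf.map pvCons := by
  induction pre with
  | nil => simp [pvG]
  | cons t pre ih =>
    simp only [List.mem_cons, not_or] at h
    simp [pvG, Ne.symm h.1, ih h.2]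

-- B's token list equals pvG
lemma altList_eq (tokens : List String) :
    (PySem.List.slice tokens none (some (match PySem.List.index? tokens "=>" with
        | some i => (i : Int) | none => (tokens.length : Int)))).map pvAnte ++
    (PySem.List.slice tokens (some (match PySem.List.index? tokens "=>" with
        | some i => (i : Int) | none => (tokens.length : Int))) none).map pvCons
    = pvG tokens := by
  cases hidx : PySem.List.index? tokens "=>" with
  | none =>
    have hmem : "=>" ∉ tokens := (PySem.List.index?_eq_none_iff tokens "=>").1 hidx
    simp [PySem.List.slice_to_natCast, PySem.List.slice_from_natCast, pvG_no_imp tokens hmem]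
  | some k =>
    obtain ⟨pre, suf, heq, hlen, hpre⟩ := (PySem.List.index?_eq_some_iff tokens "=>" k).1 hidx
    subst heq
    rw [PySem.List.slice_to_natCast, PySem.List.slice_from_natCast, pvG_split pre suf hpre]
    rw [← hlen]
    simp [pvCons]

-- ===== VERDICT (by name: the statement is the Claim_ definition above) =====
theorem convert_implication_to_cnf_spec : Claim_equal_convert_implication_to_cnf := by
  intro tokens _
  unfold Spec_convert_implication_to_cnf convert_implication_to_cnf convert_implication_to_cnf_alt
  simp only []
  rw [loopA_false tokens []]
  simpa [pvAnte, pvCons] using congrArg (PySem.Str.join " ") (altList_eq tokens).symm
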